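-- pv_equiv track=rewrite | github.com/DockerDiscordControl/DockerDiscordControl-Windows | scripts/extract_translations.py | build_english_from_keys
-- ===== SOURCE A (Python) =====
-- def build_english_from_keys(translations):
--     """Build English translation file where key = value for all keys across all languages."""
--     all_keys = set()
--     for lang_dict in translations.values():
--         all_keys.update(lang_dict.keys())
--
--     # For English, check if there's an explicit 'en' dict
--     en_dict = translations.get('en', {})
--
--     # For any key not in en, the key itself IS the English text
--     en_full = {}
--     for key in sorted(all_keys):
--         en_full[key] = en_dict.get(key, key)
--
--     return en_full
-- ===== SOURCE B (Python) =====
-- def build_english_from_keys(translations):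
--     """Build English translation file where key = value for all keys across all languages."""
--     # sort the key multiset (duplicates included), then dedup on the fly below
--     all_keys = sorted(k for d in translations.values() for k in d)
--     # explicit English entries, sorted by key, consumed left-to-right by a merge pointer
--     rest = sorted(translations.get('en', {}).items(), key=lambda p: p[0])
--
--     en_full = {}
--     prev = None
--     for k in all_keys:
--         if k == prev:          # duplicate of the previous sorted key: skip
--             continue
--         prev = k
--         while rest and rest[0][0] < k:   # advance the merge pointer
--             rest = rest[1:]
--         if rest and rest[0][0] == k:
--             en_full[k] = rest[0][1]
--         else:
--             en_full[k] = k
--     return en_full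
-- ===== Notes on version B (the rewrite author's own statement) =====
-- stated objective: alternative
-- what changed: Replaces A's hash-set union plus per-key dict lookup by sorting the raw key multiset with on-the-fly adjacent deduplication and a linear two-pointer merge against the sorted explicit 'en' items, so no set and no dict lookup remain; Pre_ excludes association lists with duplicate keys, which a Python dict cannot represent.
import Mathlib
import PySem

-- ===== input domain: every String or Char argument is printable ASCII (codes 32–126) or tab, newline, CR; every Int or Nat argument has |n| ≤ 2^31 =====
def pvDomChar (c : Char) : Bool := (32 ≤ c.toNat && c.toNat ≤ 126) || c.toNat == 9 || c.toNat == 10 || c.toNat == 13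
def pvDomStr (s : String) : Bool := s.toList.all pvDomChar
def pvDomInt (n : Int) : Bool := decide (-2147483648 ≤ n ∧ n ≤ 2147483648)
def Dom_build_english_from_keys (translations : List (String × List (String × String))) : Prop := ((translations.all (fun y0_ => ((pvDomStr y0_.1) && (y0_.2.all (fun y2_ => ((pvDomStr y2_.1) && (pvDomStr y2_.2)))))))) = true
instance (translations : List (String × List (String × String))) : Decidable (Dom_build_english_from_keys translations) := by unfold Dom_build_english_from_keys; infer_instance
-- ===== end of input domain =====

-- B sorts the raw key multiset and builds the dict by adjacent dedup plus a two-pointer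
-- merge with the sorted explicit 'en' items, instead of A's set union and per-key lookup.


-- ===== PORT A =====
def build_english_from_keys (translations : List (String × List (String × String))) : List (String × String) :=
  -- all_keys = set(); for lang_dict in translations.values(): all_keys.update(lang_dict.keys())
  let all_keys : PySem.Set String :=
    translations.foldl (fun s p => PySem.Set.update s ((PySem.Dict.mk p.2).keys)) PySem.Set.empty
  -- en_dict = translations.get('en', {})
  let en_dict : PySem.Dict String String :=
    PySem.Dict.mk ((PySem.Dict.mk translations).getD "en" [])
  -- en_full = {}; for key in sorted(all_keys): en_full[key] = en_dict.get(key, key)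
  let sortedKeys := PySem.List.sorted all_keys (fun x => x) false
  let en_full :=
    sortedKeys.foldl (fun d key => d.insert key (en_dict.getD key key)) PySem.Dict.empty
  en_full.items

-- ===== PORT B =====
-- while rest and rest[0][0] < k: rest = rest[1:]
def pvDropLt (k : String) : List (String × String) → List (String × String)
  | [] => []
  | p :: tl => if p.1 < k then pvDropLt k tl else p :: tl

-- the for-loop over all_keys with state (prev, rest, en_full)
def pvMergeLoop : List String → Option String → List (String × String) →
    PySem.Dict String String → PySem.Dict String String
  | [], _, _, d => d
  | k :: tl, prev, rest, d =>
    if prev = some k then pvMergeLoop tl prev rest d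
    else
      match pvDropLt k rest with
      | p :: t =>
        if p.1 = k then pvMergeLoop tl (some k) (p :: t) (d.insert k p.2)
        else pvMergeLoop tl (some k) (p :: t) (d.insert k k)
      | [] => pvMergeLoop tl (some k) [] (d.insert k k)

def build_english_from_keys_alt (translations : List (String × List (String × String))) : List (String × String) :=
  -- all_keys = sorted(k for d in translations.values() for k in d)
  let all_keys :=
    PySem.List.sorted
      (translations.foldl (fun acc p => acc ++ (PySem.Dict.mk p.2).keys) [])
      (fun x => x) false
  -- rest = sorted(translations.get('en', {}).items(), key=lambda p: p[0])
  let rest :=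
    PySem.List.sorted ((PySem.Dict.mk translations).getD "en" []) (fun p => p.1) false
  (pvMergeLoop all_keys none rest PySem.Dict.empty).items

-- ===== PRECONDITION & SPEC =====
-- Pre_ excludes association lists with a repeated key (in the outer dict or an inner one):
-- a Python dict cannot hold duplicate keys, and on such lists first-match lookup (A) and
-- sorted-merge lookup (B) are both accidental.
def Pre_build_english_from_keys (translations : List (String × List (String × String))) : Prop :=
  (translations.map Prod.fst).Nodup ∧ ∀ p ∈ translations, (p.2.map Prod.fst).Nodup
instance (translations : List (String × List (String × String))) : Decidable (Pre_build_english_from_keys translations) := by unfold Pre_build_english_from_keys; infer_instance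
def pvWitness_build_english_from_keys : (List (String × List (String × String))) :=
  [("en", [("greet", "Hello")]), ("de", [("greet", "Hallo"), ("bye", "Tschuess")])]
def Spec_build_english_from_keys (translations : List (String × List (String × String))) (out : List (String × String)) : Prop := out = build_english_from_keys_alt translations
instance (translations : List (String × List (String × String))) (out : List (String × String)) : Decidable (Spec_build_english_from_keys translations out) := by unfold Spec_build_english_from_keys; infer_instance

-- ===== CLAIM (what is proved, stated in full; the proofs are below) =====
def Claim_equal_build_english_from_keys : Prop := ∀ (translations : List (String × List (String × String))), Dom_build_english_from_keys translations → Pre_build_english_from_keys translations → Spec_build_english_from_keys translations (build_english_from_keys translations)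

-- ===== LEMMAS AND PROOFS =====

-- the specification-side shadows of B's loop state
def pvDedup : Option String → List String → List String
  | _, [] => []
  | prev, k :: tl => if prev = some k then pvDedup prev tl else k :: pvDedup (some k) tl

def pvLookup (rest : List (String × String)) (k : String) : String :=
  match rest.find? (fun p => p.1 == k) with
  | some p => p.2
  | none => k

theorem pv_find?_pvDropLt (l : List (String × String)) (k k' : String) (h : k ≤ k') :
    (pvDropLt k l).find? (fun p => p.1 == k') = l.find? (fun p => p.1 == k') := by
  induction l with
  | nil => rfl
  | cons p tl ih =>
      rw [pvDropLt]
      by_cases hp : p.1 < k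
      · have hne : ¬ (p.1 == k') = true := by
          simp only [beq_iff_eq]; exact fun he => absurd (he ▸ hp) (not_lt.mpr h)
        simp [hp, ih, hne]
      · simp [hp]

theorem pv_pvDropLt_sublist (k : String) (l : List (String × String)) :
    (pvDropLt k l).Sublist l := by
  induction l with
  | nil => exact List.Sublist.refl _
  | cons p tl ih =>
      rw [pvDropLt]
      by_cases hp : p.1 < k
      · simpa [hp] using ih.cons p
      · simp [hp]

theorem pv_pvDropLt_head_not_lt (k : String) (l : List (String × String)) (p : String × String)
    (t : List (String × String)) (h : pvDropLt k l = p :: t) : ¬ p.1 < k := by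
  induction l with
  | nil => simp [pvDropLt] at h
  | cons q tl ih =>
      rw [pvDropLt] at h
      by_cases hq : q.1 < k
      · exact ih (by simpa [hq] using h)
      · rw [if_neg hq] at h
        cases h; exact hq

theorem pv_mem_pvDedup (l : List String) : ∀ (prev : Option String),
    l.Pairwise (· ≤ ·) → (∀ p, prev = some p → ∀ x ∈ l, p ≤ x) →
    ∀ x, x ∈ pvDedup prev l ↔ x ∈ l ∧ some x ≠ prev := by
  induction l with
  | nil => intro prev _ _ x; simp [pvDedup]
  | cons k tl ih =>
      intro prev hpw hprev x
      rw [pvDedup]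
      by_cases hp : prev = some k
      · rw [if_pos hp, ih prev hpw.of_cons
          (fun p hps y hy => hprev p hps y (List.mem_cons_of_mem _ hy)) x]
        constructor
        · rintro ⟨h1, h2⟩; exact ⟨List.mem_cons_of_mem _ h1, h2⟩
        · rintro ⟨h1, h2⟩
          rcases List.mem_cons.mp h1 with rfl | h1
          · exact absurd hp.symm h2
          · exact ⟨h1, h2⟩
      · rw [if_neg hp]
        have hk : ∀ p, (some k : Option String) = some p → ∀ y ∈ tl, p ≤ y := by
          rintro p hpe y hy; cases hpe; exact (List.pairwise_cons.mp hpw).1 y hy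
        rw [List.mem_cons, ih (some k) hpw.of_cons hk x]
        constructor
        · rintro (rfl | ⟨h1, h2⟩)
          · exact ⟨List.mem_cons_self, fun he => hp he.symm⟩
          · refine ⟨List.mem_cons_of_mem _ h1, ?_⟩
            intro he
            rcases prev with _ | p
            · cases he
            · have hpk : p ≤ k := by
                have := hprev p rfl k List.mem_cons_self; exact this
              have hky : k ≤ x := (List.pairwise_cons.mp hpw).1 x h1
              have : p = x := by cases he; rfl
              exact h2 (by simp [le_antisymm (this ▸ hpk) (this ▸ hky) |>.symm])
        · rintro ⟨h1, h2⟩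
          rcases List.mem_cons.mp h1 with rfl | h1
          · exact Or.inl rfl
          · by_cases hxk : x = k
            · exact Or.inl hxk
            · exact Or.inr ⟨h1, by simpa using hxk⟩

theorem pv_pairwise_pvDedup (l : List String) : ∀ (prev : Option String),
    l.Pairwise (· ≤ ·) → (∀ p, prev = some p → ∀ x ∈ l, p ≤ x) →
    (pvDedup prev l).Pairwise (· < ·) := by
  induction l with
  | nil => intro _ _ _; simp [pvDedup]
  | cons k tl ih =>
      intro prev hpw hprev
      rw [pvDedup]
      by_cases hp : prev = some k
      · rw [if_pos hp]
        exact ih prev hpw.of_cons (fun p hps y hy => hprev p hps y (List.mem_cons_of_mem _ hy))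
      · rw [if_neg hp]
        have hk : ∀ p, (some k : Option String) = some p → ∀ y ∈ tl, p ≤ y := by
          rintro p hpe y hy; cases hpe; exact (List.pairwise_cons.mp hpw).1 y hy
        refine List.pairwise_cons.mpr ⟨?_, ih (some k) hpw.of_cons hk⟩
        intro y hy
        have := (pv_mem_pvDedup tl (some k) hpw.of_cons hk y).mp hy
        exact lt_of_le_of_ne ((List.pairwise_cons.mp hpw).1 y this.1)
          (fun he => this.2 (by simp [he]))

theorem pv_mem_pvDedup_sub (l : List String) : ∀ (prev : Option String) (x : String),
    x ∈ pvDedup prev l → x ∈ l := by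
  induction l with
  | nil => intro _ _ h; simp [pvDedup] at h
  | cons k tl ih =>
      intro prev x h
      rw [pvDedup] at h
      by_cases hp : prev = some k
      · rw [if_pos hp] at h; exact List.mem_cons_of_mem _ (ih prev x h)
      · rw [if_neg hp] at h
        rcases List.mem_cons.mp h with rfl | h
        · exact List.mem_cons_self
        · exact List.mem_cons_of_mem _ (ih (some k) x h)

theorem pv_foldl_congr {α β : Type} (l : List α) (f g : β → α → β) (d : β)
    (h : ∀ x ∈ l, ∀ d, f d x = g d x) : l.foldl f d = l.foldl g d := by
  induction l generalizing d with
  | nil => rfl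
  | cons a tl ih =>
      rw [List.foldl_cons, List.foldl_cons, h a List.mem_cons_self]
      exact ih _ (fun x hx => h x (List.mem_cons_of_mem _ hx))

-- B's loop computes the fold of pvLookup over the deduplicated sorted key list
theorem pv_merge_spec (K : List String) : ∀ (prev : Option String)
    (rest : List (String × String)) (d : PySem.Dict String String),
    K.Pairwise (· ≤ ·) →
    (rest.map Prod.fst).Pairwise (· ≤ ·) →
    (∀ p, prev = some p → ∀ x ∈ K, p ≤ x) →
    pvMergeLoop K prev rest d =
      (pvDedup prev K).foldl (fun d k => d.insert k (pvLookup rest k)) d := by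
  induction K with
  | nil => intro prev rest d _ _ _; rfl
  | cons k tl ih =>
      intro prev rest d hK hrest hprev
      rw [pvMergeLoop, pvDedup]
      by_cases hp : prev = some k
      · rw [if_pos hp, if_pos hp]
        exact ih prev rest d hK.of_cons hrest
          (fun p hps y hy => hprev p hps y (List.mem_cons_of_mem _ hy))
      · rw [if_neg hp, if_neg hp, List.foldl_cons]
        have hk : ∀ p, (some k : Option String) = some p → ∀ y ∈ tl, p ≤ y := by
          rintro p hpe y hy; cases hpe; exact (List.pairwise_cons.mp hK).1 y hy
        have hrest' : ((pvDropLt k rest).map Prod.fst).Pairwise (· ≤ ·) :=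
          List.Pairwise.sublist (List.Sublist.map _ (pv_pvDropLt_sublist k rest)) hrest
        -- pvLookup agrees between rest and its dropped version for keys ≥ k
        have hlk : ∀ x, k ≤ x → pvLookup (pvDropLt k rest) x = pvLookup rest x := by
          intro x hx; unfold pvLookup; rw [pv_find?_pvDropLt rest k x hx]
        have hfold : ∀ d' : PySem.Dict String String,
            (pvDedup (some k) tl).foldl
              (fun d k' => d.insert k' (pvLookup (pvDropLt k rest) k')) d' =
            (pvDedup (some k) tl).foldl (fun d k' => d.insert k' (pvLookup rest k')) d' := by
          intro d'
          refine pv_foldl_congr _ _ _ _ (fun x hx d'' => ?_)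
          rw [hlk x ((List.pairwise_cons.mp hK).1 x (pv_mem_pvDedup_sub tl (some k) x hx))]
        -- the inserted value is pvLookup rest k
        cases hdr : pvDropLt k rest with
        | nil =>
            have hv : pvLookup rest k = k := by
              unfold pvLookup; rw [← pv_find?_pvDropLt rest k k le_rfl, hdr]; rfl
            show pvMergeLoop tl (some k) [] (d.insert k k) = _
            rw [ih (some k) [] (d.insert k k) hK.of_cons
              (by rw [hdr] at hrest'; exact hrest') hk, ← hdr, hfold, hv]
        | cons p t =>
            have hple : ¬ p.1 < k := pv_pvDropLt_head_not_lt k rest p t hdr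
            show (if p.1 = k then pvMergeLoop tl (some k) (p :: t) (d.insert k p.2)
              else pvMergeLoop tl (some k) (p :: t) (d.insert k k)) = _
            by_cases hpk : p.1 = k
            · rw [if_pos hpk]
              have hv : pvLookup rest k = p.2 := by
                unfold pvLookup
                rw [← pv_find?_pvDropLt rest k k le_rfl, hdr]
                simp [hpk]
              rw [ih (some k) (p :: t) (d.insert k p.2) hK.of_cons
                (by rw [hdr] at hrest'; exact hrest') hk, ← hdr, hfold, hv]
            · rw [if_neg hpk]
              have hv : pvLookup rest k = k := by
                unfold pvLookup
                rw [← pv_find?_pvDropLt rest k k le_rfl, hdr]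
                have hgt : k < p.1 := lt_of_le_of_ne (not_lt.mp hple) (fun h => hpk h.symm)
                have hnone : t.find? (fun q => q.1 == k) = none := by
                  rw [List.find?_eq_none]
                  intro q hq
                  have hpq : p.1 ≤ q.1 := by
                    have hh := hrest'
                    rw [hdr] at hh
                    exact (List.pairwise_cons.mp (List.pairwise_map.mp hh)).1 q hq
                  simp only [beq_iff_eq]
                  intro he
                  exact absurd (lt_of_lt_of_le hgt hpq) (by rw [he]; exact lt_irrefl k)
                simp [hpk, hnone]
              rw [ih (some k) (p :: t) (d.insert k k) hK.of_cons
                (by rw [hdr] at hrest'; exact hrest') hk, ← hdr, hfold, hv]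

-- membership in the two key collections coincides
theorem pv_mem_foldl_append (l : List (String × List (String × String)))
    (acc : List String) (y : String) :
    y ∈ l.foldl (fun acc p => acc ++ (PySem.Dict.mk p.2).keys) acc ↔
      y ∈ acc ∨ ∃ p ∈ l, y ∈ (PySem.Dict.mk p.2).keys := by
  induction l generalizing acc with
  | nil => simp
  | cons a tl ih =>
      simp only [List.foldl_cons, ih, List.mem_append, List.mem_cons]
      constructor
      · rintro (⟨h | h⟩ | ⟨p, hp, hy⟩)
        · exact Or.inl h
        · exact Or.inr ⟨a, Or.inl rfl, h⟩
        · exact Or.inr ⟨p, Or.inr hp, hy⟩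
      · rintro (h | ⟨p, (rfl | hp), hy⟩)
        · exact Or.inl (Or.inl h)
        · exact Or.inl (Or.inr hy)
        · exact Or.inr ⟨p, hp, hy⟩

theorem pv_nodup_foldl_update (l : List (String × List (String × String)))
    (s : PySem.Set String) (h : s.Nodup) :
    (l.foldl (fun s p => PySem.Set.update s ((PySem.Dict.mk p.2).keys)) s).Nodup := by
  induction l generalizing s with
  | nil => exact h
  | cons a tl ih =>
      simp only [List.foldl_cons]
      exact ih _ (PySem.Set.nodup_update _ _ h)

theorem pv_mem_foldl_update (l : List (String × List (String × String)))
    (s : PySem.Set String) (y : String) :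
    y ∈ l.foldl (fun s p => PySem.Set.update s ((PySem.Dict.mk p.2).keys)) s ↔
      y ∈ s ∨ ∃ p ∈ l, y ∈ (PySem.Dict.mk p.2).keys := by
  induction l generalizing s with
  | nil => simp [List.foldl]
  | cons a tl ih =>
      simp only [List.foldl_cons, ih, PySem.Set.mem_update, List.mem_cons]
      constructor
      · rintro (⟨h | h⟩ | ⟨p, hp, hy⟩)
        · exact Or.inl h
        · exact Or.inr ⟨a, Or.inl rfl, h⟩
        · exact Or.inr ⟨p, Or.inr hp, hy⟩
      · rintro (h | ⟨p, (rfl | hp), hy⟩)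
        · exact Or.inl (Or.inl h)
        · exact Or.inl (Or.inr hy)
        · exact Or.inr ⟨p, hp, hy⟩

-- get? of a literal dict is the first match
theorem pv_get?_mk {ν : Type} (l : List (String × ν)) (k : String) :
    (PySem.Dict.mk l).get? k = (l.find? (fun q => q.1 == k)).map (·.2) := by
  induction l with
  | nil => rfl
  | cons a tl ih =>
      rw [PySem.Dict.get?_mk_cons, List.find?_cons]
      by_cases h : a.1 == k <;> simp [h, ih]

-- find? by key is permutation-invariant when the keys are distinct
theorem pv_find?_key_perm (l m : List (String × String)) (hp : l.Perm m)
    (hnd : (l.map Prod.fst).Nodup) (k : String) :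
    l.find? (fun p => p.1 == k) = m.find? (fun p => p.1 == k) := by
  cases hl : l.find? (fun p => p.1 == k) with
  | none =>
      rw [List.find?_eq_none] at hl
      symm; rw [List.find?_eq_none]
      exact fun x hx => hl x (hp.mem_iff.mpr hx)
  | some p =>
      have hpl : p ∈ l := List.mem_of_find?_eq_some hl
      have hpk : p.1 = k := by simpa using List.find?_some hl
      have hm : (m.find? (fun p => p.1 == k)).isSome := by
        rw [List.find?_isSome]
        exact ⟨p, hp.mem_iff.mp hpl, by simpa using hpk⟩
      obtain ⟨q, hq⟩ := Option.isSome_iff_exists.mp hm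
      have hql : q ∈ l := hp.mem_iff.mpr (List.mem_of_find?_eq_some hq)
      have hqk : q.1 = k := by simpa using List.find?_some hq
      have : q = p :=
        List.inj_on_of_nodup_map hnd hql hpl (hqk.trans hpk.symm)
      rw [hq, this]

-- ===== VERDICT (by name: the statement is the Claim_ definition above) =====
theorem build_english_from_keys_spec : Claim_equal_build_english_from_keys := by
  intro T _hDom hPre
  unfold Spec_build_english_from_keys build_english_from_keys build_english_from_keys_alt
  dsimp only
  set AK : PySem.Set String :=
    T.foldl (fun s p => PySem.Set.update s ((PySem.Dict.mk p.2).keys)) PySem.Set.empty with hAK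
  set L : List String := T.foldl (fun acc p => acc ++ (PySem.Dict.mk p.2).keys) [] with hL
  set E : List (String × String) := (PySem.Dict.mk T).getD "en" [] with hE
  set K : List String := PySem.List.sorted AK (fun x => x) false with hK
  set K0 : List String := PySem.List.sorted L (fun x => x) false with hK0
  set E' : List (String × String) := PySem.List.sorted E (fun p => p.1) false with hE'
  set enD : PySem.Dict String String := PySem.Dict.mk E with henD
  -- E has distinct keys (it is an inner dict of T, or empty)
  have hEnd : (E.map Prod.fst).Nodup := by
    rw [hE, PySem.Dict.getD_eq_get?_getD]
    cases hg : (PySem.Dict.mk T).get? "en" with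
    | none => simp
    | some l =>
        have hmem : ("en", l) ∈ T := PySem.Dict.mem_items_of_get?_eq_some _ hg
        simpa using hPre.2 ("en", l) hmem
  -- sortedness facts
  have hK0pw : K0.Pairwise (· ≤ ·) := by
    have := PySem.List.sorted_pairwise L (fun x => x)
    simpa using this
  have hE'pw : (E'.map Prod.fst).Pairwise (· ≤ ·) :=
    List.pairwise_map.mpr (PySem.List.sorted_pairwise E (fun p => p.1))
  -- B's loop is the fold over pvDedup none K0
  rw [pv_merge_spec K0 none E' PySem.Dict.empty hK0pw hE'pw (by rintro p ⟨⟩)]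
  -- pvDedup none K0 = K (both are the strictly increasing enumeration of the key set)
  have hded : K = pvDedup none K0 := by
    rw [hK]
    refine PySem.List.sorted_eq_of_perm_of_pairwise_lt AK (pvDedup none K0) (fun x => x) ?_ ?_
    · refine (List.perm_ext_iff_of_nodup
        ((pv_pairwise_pvDedup K0 none hK0pw (by rintro p ⟨⟩)).imp ne_of_lt)
        (pv_nodup_foldl_update T PySem.Set.empty List.nodup_nil)).mpr (fun a => ?_)
      have h1 : a ∈ pvDedup none K0 ↔ a ∈ K0 := by
        rw [pv_mem_pvDedup K0 none hK0pw (by rintro p ⟨⟩) a]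
        simp
      rw [h1, hK0, PySem.List.mem_sorted, hL, pv_mem_foldl_append]
      rw [pv_mem_foldl_update T PySem.Set.empty a]
      simp
    · exact pv_pairwise_pvDedup K0 none hK0pw (by rintro p ⟨⟩)
  rw [← hded]
  -- pointwise value agreement: pvLookup E' k = enD.getD k k
  refine congrArg PySem.Dict.items (pv_foldl_congr K _ _ _ (fun k _ d => ?_))
  have hfind : E'.find? (fun p => p.1 == k) = E.find? (fun p => p.1 == k) :=
    pv_find?_key_perm E' E (PySem.List.sorted_perm E (fun p => p.1) false)
      (((PySem.List.sorted_perm E (fun p => p.1) false).map Prod.fst).nodup_iff.mpr hEnd) k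
  rw [henD, PySem.Dict.getD_eq_get?_getD, pv_get?_mk]
  unfold pvLookup
  rw [hfind]
  cases E.find? (fun p => p.1 == k) <;> rfl
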